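-- pv_equiv track=rewrite | github.com/StelianRBG/TU | Python/lab4.py | list_order
-- ===== SOURCE A (Python) =====
-- def list_order(list1):
--     # count max and orders
--     maxs, mins = 0, 0
--     for i in range(1,len(list1)):
--         if list1[i] > list1[i-1]:
--             maxs += 1
--         else:
--             mins +=1
--     # check maxs and mins
--     if maxs == len(list1) - 1:
--         return "Монотонно растяща редица"
--     elif mins == len(list1) - 1:
--         return "Монотонно намаляваща редица"
--     else:
--         return "Неопределена редица"
-- ===== SOURCE B (Python) =====
-- def list_order(list1):
--     if list1 and sorted(list1) == list1 and len(set(list1)) == len(list1):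
--         return "Монотонно растяща редица"
--     if list1 and sorted(list1, reverse=True) == list1:
--         return "Монотонно намаляваща редица"
--     return "Неопределена редица"
-- ===== Notes on version B (the rewrite author's own statement) =====
-- stated objective: alternative
-- what changed: Replaces A's single-pass counting of ascending/non-ascending adjacent steps by a sorting-based test: the list is increasing iff it equals its sorted copy and contains no duplicates (len(set)==len), decreasing iff it equals its reverse-sorted copy; trades the O(n) scan for O(n log n) comparisons against sorted copies.
import Mathlib
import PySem

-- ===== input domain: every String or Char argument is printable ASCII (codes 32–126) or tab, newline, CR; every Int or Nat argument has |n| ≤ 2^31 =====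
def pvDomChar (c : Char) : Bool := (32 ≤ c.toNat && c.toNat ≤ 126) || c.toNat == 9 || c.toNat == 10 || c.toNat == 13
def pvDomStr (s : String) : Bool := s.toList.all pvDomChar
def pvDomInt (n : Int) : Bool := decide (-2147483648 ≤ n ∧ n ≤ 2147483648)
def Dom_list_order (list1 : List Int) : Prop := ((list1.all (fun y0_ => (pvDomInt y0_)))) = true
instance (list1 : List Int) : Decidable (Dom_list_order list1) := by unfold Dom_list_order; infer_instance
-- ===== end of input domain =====

-- B replaces A's single-pass counting of ascending/non-ascending adjacent steps by a
-- sorting-based test: increasing iff the list equals its sorted copy and has no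
-- duplicates (len(set)==len), decreasing iff it equals its reverse-sorted copy.

-- ===== PORT A =====
def list_order (list1 : List Int) : String :=
  let st := (PySem.List.pyRange 1 list1.length 1).foldl
    (fun (mm : Int × Int) i =>
      if PySem.List.pyGetD list1 i 0 > PySem.List.pyGetD list1 (i - 1) 0 then
        (mm.1 + 1, mm.2)
      else
        (mm.1, mm.2 + 1)) (0, 0)
  if st.1 = (list1.length : Int) - 1 then "Монотонно растяща редица"
  else if st.2 = (list1.length : Int) - 1 then "Монотонно намаляваща редица"
  else "Неопределена редица"

-- ===== PORT B =====
def list_order_alt (list1 : List Int) : String :=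
  if !list1.isEmpty && (PySem.List.sorted list1 (fun x => x) == list1)
      && ((PySem.Set.ofList list1).length == list1.length) then
    "Монотонно растяща редица"
  else if !list1.isEmpty && (PySem.List.sorted list1 (fun x => x) true == list1) then
    "Монотонно намаляваща редица"
  else
    "Неопределена редица"

-- ===== PRECONDITION & SPEC =====
-- no Pre_: A is total
def Spec_list_order (list1 : List Int) (out : String) : Prop := out = list_order_alt list1
instance (list1 : List Int) (out : String) : Decidable (Spec_list_order list1 out) := by unfold Spec_list_order; infer_instance

-- ===== CLAIM (what is proved, stated in full; the proofs are below) =====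
def Claim_equal_list_order : Prop := ∀ (list1 : List Int), Dom_list_order list1 → Spec_list_order list1 (list_order list1)

-- ===== LEMMAS AND PROOFS =====

-- A's loop: the two counters count adjacent ascents / non-ascents
theorem foldl_count {α : Type} (l : List α) (P : α → Bool) (a b : Int) :
    l.foldl (fun (mm : Int × Int) i =>
      if P i then (mm.1 + 1, mm.2) else (mm.1, mm.2 + 1)) (a, b)
    = (a + (l.countP P : Int), b + (l.countP (fun i => !P i) : Int)) := by
  induction l generalizing a b with
  | nil => simp
  | cons x xs ih =>
    by_cases h : P x <;> simp [h, ih] <;> ring_nf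

-- count over indices 0..len-2 equals count over the zip of the list with its tail
theorem zip_count (l : List Int) (Q : Int → Int → Bool) :
    (List.range (l.length - 1)).countP
        (fun k => Q (l.getD k 0) (l.getD (k + 1) 0))
    = (l.zip l.tail).countP (fun p => Q p.1 p.2) := by
  induction l with
  | nil => simp
  | cons x xs ih =>
    cases xs with
    | nil => simp
    | cons y t =>
      have h1 : (x :: y :: t : List Int).length - 1 = ( (y :: t : List Int).length - 1) + 1 := by
        simp
      rw [h1, List.range_succ_eq_map]
      simp only [List.countP_cons, List.countP_map]
      simp only [Function.comp_def, List.getD_cons_succ, List.getD_cons_zero]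
      simp only [List.getD_cons_succ, List.tail_cons] at ih
      rw [ih]
      simp [List.countP_cons, Nat.add_comm]

-- an adjacent-pair property over the zip with the tail is exactly Chain'
theorem zip_forall_iff_chain' (l : List Int) (R : Int → Int → Prop) :
    (∀ p ∈ l.zip l.tail, R p.1 p.2) ↔ l.IsChain R := by
  induction l with
  | nil => simp
  | cons x xs ih =>
    cases xs with
    | nil => simp
    | cons y t =>
      rw [List.isChain_cons_cons, ← ih]
      simp only [List.tail_cons, List.zip_cons_cons, List.mem_cons]
      constructor
      · exact fun h => ⟨h (x, y) (Or.inl rfl), fun p hp => h p (Or.inr hp)⟩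
      · rintro ⟨hxy, h⟩ p (rfl | hp)
        · exact hxy
        · exact h p hp

-- len(set(l)) == len(l) characterises duplicate-freeness
theorem ofList_length_iff_nodup (l : List Int) :
    (PySem.Set.ofList l).length = l.length ↔ l.Nodup := by
  have hsub : (PySem.Set.ofList l) ⊆ l := fun x hx => (PySem.Set.mem_ofList l x).mp hx
  have hsp : List.Subperm (PySem.Set.ofList l) l :=
    List.subperm_of_subset (PySem.Set.nodup_ofList l) hsub
  constructor
  · intro hlen
    have hperm : List.Perm (PySem.Set.ofList l) l :=
      hsp.perm_of_length_le (le_of_eq hlen.symm)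
    exact hperm.nodup_iff.mp (PySem.Set.nodup_ofList l)
  · intro hnd
    have hsp2 : List.Subperm l (PySem.Set.ofList l) :=
      List.subperm_of_subset hnd (fun x hx => (PySem.Set.mem_ofList l x).mpr hx)
    exact Nat.le_antisymm hsp.length_le hsp2.length_le

-- B's first condition is "strictly increasing"
theorem inc_iff (l : List Int) :
    (PySem.List.sorted l (fun x => x) = l ∧ (PySem.Set.ofList l).length = l.length)
      ↔ l.Pairwise (· < ·) := by
  rw [ofList_length_iff_nodup]
  constructor
  · rintro ⟨hs, hnd⟩
    have hle : l.Pairwise (fun a b => a ≤ b) := by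
      have := PySem.List.sorted_pairwise l (fun x => x)
      rwa [hs] at this
    have := List.Pairwise.and hle hnd
    exact this.imp (fun h => lt_of_le_of_ne h.1 h.2)
  · intro hlt
    refine ⟨PySem.List.sorted_eq_self_of_pairwise l (fun x => x)
      (hlt.imp le_of_lt), hlt.imp ne_of_lt⟩

-- B's second condition is "non-increasing"
theorem dec_iff (l : List Int) :
    PySem.List.sorted l (fun x => x) true = l ↔ l.Pairwise (fun a b => b ≤ a) := by
  constructor
  · intro hs
    have := PySem.List.sorted_pairwise_rev l (fun x => x)
    rwa [hs] at this
  · exact PySem.List.sorted_rev_eq_self_of_pairwise l (fun x => x)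

theorem chain'_iff_pairwise_ge (l : List Int) :
    l.IsChain (fun a b => b ≤ a) ↔ l.Pairwise (fun a b => b ≤ a) := by
  haveI : Trans (fun (a b : Int) => b ≤ a) (fun (a b : Int) => b ≤ a) (fun (a b : Int) => b ≤ a) :=
    ⟨fun h1 h2 => le_trans h2 h1⟩
  exact List.isChain_iff_pairwise

-- a count over the zip reaching full length iff the Chain' property holds
theorem count_full_iff (l : List Int) (Q : Int → Int → Bool) :
    ((l.zip l.tail).countP (fun p => Q p.1 p.2) = (l.zip l.tail).length)
      ↔ l.IsChain (fun a b => Q a b = true) := by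
  rw [List.countP_eq_length, ← zip_forall_iff_chain']

theorem list_order_spec' (l : List Int) : list_order l = list_order_alt l := by
  cases l with
  | nil => simp [list_order, list_order_alt]
  | cons x xs =>
    unfold list_order list_order_alt
    rw [PySem.List.pyRange_one]
    rw [List.foldl_map, show ((((x :: xs : List Int).length : Int) - 1)).toNat
        = (x :: xs : List Int).length - 1 by simp]
    have hfold :
        ((List.range ((x :: xs : List Int).length - 1)).foldl
          (fun (mm : Int × Int) (k : Nat) =>
            if PySem.List.pyGetD (x :: xs) ((1 : Int) + k) 0 >
               PySem.List.pyGetD (x :: xs) ((1 : Int) + k - 1) 0 then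
              (mm.1 + 1, mm.2)
            else (mm.1, mm.2 + 1)) ((0 : Int), (0 : Int)))
        = ((List.range ((x :: xs : List Int).length - 1)).foldl
          (fun (mm : Int × Int) (k : Nat) =>
            if decide ((x :: xs : List Int).getD k 0 < (x :: xs : List Int).getD (k + 1) 0) then
              (mm.1 + 1, mm.2)
            else (mm.1, mm.2 + 1)) ((0 : Int), (0 : Int))) := by
      apply PySem.List.foldl_congr_mem
      intro mm k hk
      have h1 : ((1 : Int) + k) = ((k + 1 : Nat) : Int) := by push_cast; ring
      have h2 : ((1 : Int) + k - 1) = ((k : Nat) : Int) := by omega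
      rw [h2, h1, PySem.List.pyGetD_natCast, PySem.List.pyGetD_natCast]
      simp [gt_iff_lt]
    rw [hfold, foldl_count,
      zip_count (x :: xs) (fun a b => decide (a < b)),
      zip_count (x :: xs) (fun a b => !decide (a < b))]
    simp only [List.tail_cons, List.isEmpty_cons, Bool.not_false, Bool.true_and,
      List.length_cons]
    have hlen : ((x :: xs).zip xs).length = xs.length := by
      simp [List.length_zip]
    have hzt : (x :: xs : List Int).tail = xs := rfl
    by_cases hinc : (x :: xs : List Int).Pairwise (· < ·)
    · -- strictly increasing: both take the first branch
      have hchain : (x :: xs : List Int).IsChain (fun a b => decide (a < b) = true) := by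
        have := hinc.isChain
        exact this.imp (fun h => by simpa using h)
      have hc : ((x :: xs).zip xs).countP (fun p => decide (p.1 < p.2))
          = ((x :: xs).zip xs).length := by
        have := (count_full_iff (x :: xs) (fun a b => decide (a < b))).mpr
        rw [hzt] at this
        exact this hchain
      simp only [hc, hlen]
      have hB := (inc_iff (x :: xs)).mpr hinc
      simp [hB.1, hB.2, show ((0:Int) + (xs.length : Int) = ((xs.length + 1 : Nat) : Int) - 1) by push_cast; ring]
    · have hnfull : ¬ (((x :: xs).zip xs).countP (fun p => decide (p.1 < p.2))
          = ((x :: xs).zip xs).length) := by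
        intro h
        apply hinc
        have := (count_full_iff (x :: xs) (fun a b => decide (a < b))).mp (by rwa [hzt])
        have hch : (x :: xs : List Int).IsChain (· < ·) := this.imp (fun h => by simpa using h)
        exact List.isChain_iff_pairwise.mp hch
      have hA1 : ¬ ((0 : Int) + (((x :: xs).zip xs).countP (fun p => decide (p.1 < p.2)) : Int)
          = ((xs.length + 1 : Nat) : Int) - 1) := by
        intro h
        apply hnfull
        rw [hlen]
        omega
      have hB1 : ¬ (PySem.List.sorted (x :: xs) (fun x => x) = x :: xs
          ∧ (PySem.Set.ofList (x :: xs)).length = (x :: xs : List Int).length) := by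
        intro h; exact hinc ((inc_iff (x :: xs)).mp h)
      simp only [if_neg hA1]
      have hBfalse : ((PySem.List.sorted (x :: xs) (fun x => x) == x :: xs)
          && ((PySem.Set.ofList (x :: xs)).length == xs.length + 1)) = false := by
        by_contra hb
        have := Bool.of_not_eq_false hb
        simp only [Bool.and_eq_true, beq_iff_eq] at this
        exact hB1 ⟨this.1, by simpa using this.2⟩
      simp only [hBfalse]
      simp only [Bool.false_eq_true, if_false]
      -- now the second branches
      by_cases hdec : (x :: xs : List Int).Pairwise (fun a b => b ≤ a)
      · have hchain : (x :: xs : List Int).IsChain (fun a b => (!decide (a < b)) = true) := by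
          have := hdec.isChain
          exact this.imp (fun h => by simpa using not_lt_of_ge h)
        have hc : ((x :: xs).zip xs).countP (fun p => !decide (p.1 < p.2))
            = ((x :: xs).zip xs).length := by
          have := (count_full_iff (x :: xs) (fun a b => !decide (a < b))).mpr
          rw [hzt] at this
          exact this hchain
        simp only [hc, hlen]
        have hB := (dec_iff (x :: xs)).mpr hdec
        simp [hB, show ((0:Int) + (xs.length : Int) = ((xs.length + 1 : Nat) : Int) - 1) by push_cast; ring]
      · have hnfull : ¬ (((x :: xs).zip xs).countP (fun p => !decide (p.1 < p.2))
            = ((x :: xs).zip xs).length) := by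
          intro h
          apply hdec
          have := (count_full_iff (x :: xs) (fun a b => !decide (a < b))).mp (by rwa [hzt])
          have hch : (x :: xs : List Int).IsChain (fun a b => b ≤ a) :=
            this.imp (fun h => by simpa using h)
          exact (chain'_iff_pairwise_ge (x :: xs)).mp hch
        have hA2 : ¬ ((0 : Int) + (((x :: xs).zip xs).countP (fun p => !decide (p.1 < p.2)) : Int)
            = ((xs.length + 1 : Nat) : Int) - 1) := by
          intro h
          apply hnfull
          rw [hlen]
          omega
        simp only [if_neg hA2]
        have hB2 : ¬ (PySem.List.sorted (x :: xs) (fun x => x) true = x :: xs) := by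
          intro h; exact hdec ((dec_iff (x :: xs)).mp h)
        have hBfalse2 : ((PySem.List.sorted (x :: xs) (fun x => x) true == x :: xs)) = false := by
          by_contra hb
          exact hB2 (by simpa using Bool.of_not_eq_false hb)
        simp only [hBfalse2]
        rfl

-- ===== VERDICT (by name: the statement is the Claim_ definition above) =====
theorem list_order_spec : Claim_equal_list_order := by
  intro l _
  unfold Spec_list_order
  exact list_order_spec' l
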